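-- pv_equiv track=rewrite | github.com/981377660LMT/algorithm-study | 1_stack/单调栈/3113. 边界元素是最大值的子数组数目.py | numberOfSubarrays2
-- ===== SOURCE A (Python) =====
-- from bisect import bisect_left, bisect_right
-- from typing import List
--
-- def numberOfSubarrays2(nums: List[int]) -> int:
--     """
--     第一个数是区间最小值，最后一个数是区间最大值.
--     维护两个单调栈.
--     第一个单调栈求右边第一个>a[i]的下标lg[i].
--     然后第二个栈维护的是候选的左端点，淘汰那些不可能作为左端点的下标.
--     然后在第二个栈上二分找a[i]对应可能的左边.
--     """
--     res = 0
--     rightBigger = [-1]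
--     leftCand = []  # 从栈底到栈顶递增的栈, 考虑所有可能的左边界
--     for i, v in enumerate(nums):
--         while len(rightBigger) > 1 and nums[rightBigger[-1]] <= v:
--             rightBigger.pop()
--         top = rightBigger[-1]
--         rightBigger.append(i)
--         res += len(leftCand) - bisect_right(leftCand, top) + 1
--         while leftCand and nums[leftCand[-1]] > v:
--             leftCand.pop()
--         leftCand.append(i)
--     return res
-- ===== SOURCE B (Python) =====
-- from typing import List
--
-- def numberOfSubarrays2(nums: List[int]) -> int:
--     # count subarrays whose first element is the minimum and last element the maximum,
--     # by a direct scan from each left endpoint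
--     total = 0
--     n = len(nums)
--     for l in range(n):
--         lo = nums[l]
--         hi = nums[l]
--         for r in range(l, n):
--             if nums[r] < lo:
--                 break
--             if nums[r] >= hi:
--                 total += 1
--                 hi = nums[r]
--     return total
-- ===== Notes on version B (the rewrite author's own statement) =====
-- stated objective: simpler
-- what changed: Replaced the two monotonic stacks plus bisect with a direct definition-based count: for each left index scan right, breaking when an element drops below nums[l] and counting positions that attain a new running maximum.
import Mathlib
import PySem

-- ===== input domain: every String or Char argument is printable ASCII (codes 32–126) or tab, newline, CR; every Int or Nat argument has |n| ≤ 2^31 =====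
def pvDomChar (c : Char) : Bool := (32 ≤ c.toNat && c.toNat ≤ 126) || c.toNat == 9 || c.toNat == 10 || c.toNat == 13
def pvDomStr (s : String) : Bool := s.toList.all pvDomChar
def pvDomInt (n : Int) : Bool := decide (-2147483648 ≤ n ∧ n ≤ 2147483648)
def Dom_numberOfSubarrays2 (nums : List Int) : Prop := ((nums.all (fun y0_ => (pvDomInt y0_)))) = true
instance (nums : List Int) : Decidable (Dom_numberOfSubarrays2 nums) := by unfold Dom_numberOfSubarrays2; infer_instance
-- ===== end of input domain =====

-- B replaces A's two monotonic stacks + bisect with a direct definition-based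
-- scan from each left endpoint (objective: simpler; not faster).

-- ===== PORT A =====
-- nums[j] for an index known to be in range (A only indexes with valid non-negative indices)
def pvGetI (nums : List Int) (j : Int) : Int := (PySem.List.pyGet? nums j).getD 0

-- 'while len(rightBigger) > 1 and nums[rightBigger[-1]] <= v: rightBigger.pop()'
-- (stack represented head-is-top)
def pvPopRB (nums : List Int) (v : Int) : List Int → List Int
  | [] => []
  | [t] => [t]
  | t :: u :: rest =>
      if pvGetI nums t ≤ v then pvPopRB nums v (u :: rest) else t :: u :: rest

-- bisect_right on a sorted list = number of elements ≤ x (leftCand is always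
-- strictly increasing, where this is exact)
def pvBisectRight (xs : List Int) (x : Int) : Int := (xs.countP (fun a => decide (a ≤ x)) : Int)

-- 'while leftCand and nums[leftCand[-1]] > v: leftCand.pop()'
def pvPopLC (nums : List Int) (v : Int) : List Int → List Int
  | [] => []
  | j :: rest => if v < pvGetI nums j then pvPopLC nums v rest else j :: rest

def pvAStep (nums : List Int) (st : Int × List Int × List Int) (p : Int × Int) : Int × List Int × List Int :=
  let res := st.1
  let rightBigger := st.2.1
  let leftCand := st.2.2
  let i := p.1
  let v := p.2
  let rb' := pvPopRB nums v rightBigger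
  let top := rb'.headD (-1)
  let rb'' := i :: rb'
  let res' := res + ((leftCand.length : Int) - pvBisectRight leftCand top + 1)
  let lc' := i :: pvPopLC nums v leftCand
  (res', rb'', lc')

def numberOfSubarrays2 (nums : List Int) : Int :=
  ((PySem.List.enumerate nums 0).foldl (pvAStep nums) (0, [-1], [])).1

-- ===== PORT B =====
-- inner loop over r from a fixed left endpoint: lo = nums[l], hi = running max
def pvInner (lo : Int) : Int → List Int → Int
  | _, [] => 0
  | hi, x :: xs => if x < lo then 0 else if hi ≤ x then 1 + pvInner lo x xs else pvInner lo hi xs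

def numberOfSubarrays2_alt : List Int → Int
  | [] => 0
  | x :: xs => pvInner x x (x :: xs) + numberOfSubarrays2_alt xs

-- ===== PRECONDITION & SPEC =====
def Spec_numberOfSubarrays2 (nums : List Int) (out : Int) : Prop := out = numberOfSubarrays2_alt nums
instance (nums : List Int) (out : Int) : Decidable (Spec_numberOfSubarrays2 nums out) := by unfold Spec_numberOfSubarrays2; infer_instance

-- ===== CLAIM (what is proved, stated in full; the proofs are below) =====
def Claim_equal_numberOfSubarrays2 : Prop := ∀ (nums : List Int), Dom_numberOfSubarrays2 nums → Spec_numberOfSubarrays2 nums (numberOfSubarrays2 nums)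

-- ===== LEMMAS AND PROOFS =====

-- nums[k] with a Nat index, default 0 (all uses are in range)
def pvG (nums : List Int) (k : Nat) : Int := nums.getD k 0

-- the subarray [l..r] has its minimum at l and its maximum at r
abbrev pvCond (nums : List Int) (l r : Nat) : Prop :=
  ∀ k < r + 1, l ≤ k → pvG nums l ≤ pvG nums k ∧ pvG nums k ≤ pvG nums r

-- number of valid left endpoints for right endpoint r
def pvColCount (nums : List Int) (r : Nat) : Nat :=
  (List.range (r + 1)).countP (fun l => decide (pvCond nums l r))

-- total over right endpoints r < i
def pvTotalUpto (nums : List Int) (i : Nat) : Nat :=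
  ((List.range i).map (pvColCount nums)).sum

-- j is a left-candidate after the first i elements
abbrev pvLcP (nums : List Int) (i j : Nat) : Prop := ∀ k < i, j < k → pvG nums j ≤ pvG nums k
-- j is on the rightBigger stack after the first i elements
abbrev pvRbP (nums : List Int) (i j : Nat) : Prop := ∀ k < i, j < k → pvG nums k < pvG nums j

def pvLCs (nums : List Int) (i : Nat) : List Int :=
  (((List.range i).filter (fun j => decide (pvLcP nums i j))).reverse).map (fun (j : Nat) => (j : Int))
def pvRBs (nums : List Int) (i : Nat) : List Int :=
  (((List.range i).filter (fun j => decide (pvRbP nums i j))).reverse).map (fun (j : Nat) => (j : Int)) ++ [-1]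

lemma pvGetI_cast (nums : List Int) (j : Nat) :
    pvGetI nums (j : Int) = pvG nums j := by
  simp [pvGetI, pvG, PySem.List.pyGet?_natCast, List.getD_eq_getElem?_getD]

-- ---- B side ----
abbrev pvInnerCond (lo hi : Int) (ys : List Int) (r : Nat) : Prop :=
  (∀ k < r + 1, lo ≤ pvG ys k) ∧ hi ≤ pvG ys r ∧ (∀ k < r, pvG ys k ≤ pvG ys r)

lemma pvInner_spec (lo : Int) : ∀ (hi : Int) (ys : List Int),
    pvInner lo hi ys = ((List.range ys.length).countP (fun r => decide (pvInnerCond lo hi ys r)) : Int) := by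
  intro hi ys
  induction ys generalizing hi with
  | nil => rfl
  | cons x xs ih =>
    have hG0 : pvG (x :: xs) 0 = x := rfl
    have hGS : ∀ k : Nat, pvG (x :: xs) (k + 1) = pvG xs k := fun k => rfl
    rw [List.length_cons, List.range_succ_eq_map, List.countP_cons, List.countP_map]
    by_cases h1 : x < lo
    · have h0 : ¬ pvInnerCond lo hi (x :: xs) 0 := by
        intro ⟨ha, _, _⟩; exact absurd (ha 0 (by omega)) (by simpa [hG0] using h1)
      have hz : ((List.range xs.length).countP
          ((fun r => decide (pvInnerCond lo hi (x :: xs) r)) ∘ Nat.succ)) = 0 := by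
        apply List.countP_eq_zero.mpr
        intro r _
        simp only [Function.comp, decide_eq_true_eq]
        intro ⟨ha, _, _⟩
        exact absurd (ha 0 (by omega)) (by simpa [hG0] using h1)
      rw [hz]
      simp [pvInner, h1, h0]
    · have h1' : lo ≤ x := not_lt.mp h1
      by_cases h2 : hi ≤ x
      · have h0 : pvInnerCond lo hi (x :: xs) 0 := by
          refine ⟨?_, by simpa [hG0] using h2, by omega⟩
          intro k hk; interval_cases k; simpa [hG0] using h1'
        have hs : ∀ r ∈ List.range xs.length,
            (((fun r => decide (pvInnerCond lo hi (x :: xs) r)) ∘ Nat.succ) r = true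
              ↔ (fun r => decide (pvInnerCond lo x xs r)) r = true) := by
          intro r _
          simp only [Function.comp, decide_eq_true_eq]
          constructor
          · rintro ⟨ha, hb, hc⟩
            refine ⟨fun k hk => by simpa [hGS] using ha (k+1) (by omega), ?_, ?_⟩
            · simpa [hG0, hGS] using hc 0 (by omega)
            · intro k hk; simpa [hGS] using hc (k+1) (by omega)
          · rintro ⟨ha, hb, hc⟩
            refine ⟨?_, by simpa [hGS] using le_trans h2 hb, ?_⟩
            · intro k hk
              rcases k with _ | k
              · simpa [hG0] using h1'
              · exact by simpa [hGS] using ha k (by omega)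
            · intro k hk
              rcases k with _ | k
              · simpa [hG0, hGS] using hb
              · exact by simpa [hGS] using hc k (by omega)
        rw [List.countP_congr hs]
        simp [pvInner, h1, h2, h0, ih]
        ring
      · have h2' : x < hi := not_le.mp h2
        have h0 : ¬ pvInnerCond lo hi (x :: xs) 0 := by
          rintro ⟨_, hb, _⟩; exact absurd hb (by simpa [hG0] using not_le.mpr h2')
        have hs : ∀ r ∈ List.range xs.length,
            (((fun r => decide (pvInnerCond lo hi (x :: xs) r)) ∘ Nat.succ) r = true
              ↔ (fun r => decide (pvInnerCond lo hi xs r)) r = true) := by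
          intro r _
          simp only [Function.comp, decide_eq_true_eq]
          constructor
          · rintro ⟨ha, hb, hc⟩
            refine ⟨fun k hk => by simpa [hGS] using ha (k+1) (by omega),
              by simpa [hGS] using hb, fun k hk => by simpa [hGS] using hc (k+1) (by omega)⟩
          · rintro ⟨ha, hb, hc⟩
            have hxr : x ≤ pvG xs r := le_trans (le_of_lt h2') hb
            refine ⟨?_, by simpa [hGS] using hb, ?_⟩
            · intro k hk
              rcases k with _ | k
              · simpa [hG0] using h1'
              · exact by simpa [hGS] using ha k (by omega)
            · intro k hk
              rcases k with _ | k
              · simpa [hG0, hGS] using hxr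
              · exact by simpa [hGS] using hc k (by omega)
        rw [List.countP_congr hs]
        simp [pvInner, h1, h2, h0, ih]

lemma pvCond_shift (x : Int) (xs : List Int) (l r : Nat) :
    pvCond (x :: xs) (l + 1) (r + 1) ↔ pvCond xs l r := by
  have hGS : ∀ k : Nat, pvG (x :: xs) (k + 1) = pvG xs k := fun k => rfl
  constructor
  · intro h k hk hlk
    have := h (k + 1) (by omega) (by omega)
    simpa [hGS] using this
  · intro h k hk hlk
    rcases k with _ | k
    · omega
    · have := h k (by omega) (by omega)
      simpa [hGS] using this

lemma pv_sum_add (l : List Nat) (f g : Nat → Nat) :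
    (l.map (fun r => f r + g r)).sum = (l.map f).sum + (l.map g).sum := by
  induction l with
  | nil => rfl
  | cons a l ih => simp [ih]; omega

lemma pv_sum_ind (l : List Nat) (p : Nat → Bool) :
    (l.map (fun r => if p r then 1 else 0)).sum = l.countP p := by
  induction l with
  | nil => rfl
  | cons a l ih => by_cases h : p a <;> simp [h, ih] <;> omega

lemma pvCond_self (nums : List Int) (r : Nat) : pvCond nums r r := by
  intro k hk hrk
  have : k = r := by omega
  subst this
  exact ⟨le_refl _, le_refl _⟩

lemma pvColCount_cons (x : Int) (xs : List Int) (r : Nat) :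
    pvColCount (x :: xs) (r + 1)
      = (if pvCond (x :: xs) 0 (r + 1) then 1 else 0) + pvColCount xs r := by
  unfold pvColCount
  rw [List.range_succ_eq_map, List.countP_cons, List.countP_map]
  have hs : ∀ l ∈ List.range (r + 1),
      (((fun l => decide (pvCond (x :: xs) l (r + 1))) ∘ Nat.succ) l = true
        ↔ (fun l => decide (pvCond xs l r)) l = true) := by
    intro l _
    simp only [Function.comp, decide_eq_true_eq]
    exact pvCond_shift x xs l r
  rw [List.countP_congr hs]
  by_cases h : pvCond (x :: xs) 0 (r + 1) <;> simp [h] <;> omega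

lemma pvTotalUpto_cons (x : Int) (xs : List Int) :
    pvTotalUpto (x :: xs) (xs.length + 1)
      = (List.range (xs.length + 1)).countP (fun r => decide (pvCond (x :: xs) 0 r))
          + pvTotalUpto xs xs.length := by
  unfold pvTotalUpto
  rw [List.range_succ_eq_map, List.map_cons, List.map_map, List.sum_cons]
  rw [List.countP_cons]
  have hcol0 : pvColCount (x :: xs) 0 = 1 := by
    simp [pvColCount, List.range_succ]
  have hmapeq : (List.range xs.length).map (pvColCount (x :: xs) ∘ Nat.succ)
      = (List.range xs.length).map
          (fun r => (if pvCond (x :: xs) 0 (r + 1) then 1 else 0) + pvColCount xs r) := by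
    apply List.map_congr_left
    intro r _
    exact pvColCount_cons x xs r
  rw [hmapeq, pv_sum_add, List.countP_map]
  have hind : (List.range xs.length).map (fun r => if pvCond (x :: xs) 0 (r + 1) then (1:Nat) else 0)
      = (List.range xs.length).map (fun r => if (fun r => decide (pvCond (x :: xs) 0 (r+1))) r then (1:Nat) else 0) := by
    apply List.map_congr_left; intro r _; simp
  rw [hind, pv_sum_ind]
  have hpd : pvCond (x :: xs) 0 0 := pvCond_self _ 0
  have : List.countP ((fun r => decide (pvCond (x :: xs) 0 r)) ∘ Nat.succ) (List.range xs.length)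
      = List.countP (fun r => decide (pvCond (x :: xs) 0 (r + 1))) (List.range xs.length) := by
    apply List.countP_congr; intro r _; simp [Function.comp]
  rw [this]
  have hif : (if (fun r => decide (pvCond (x :: xs) 0 r)) 0 = true then (1:Nat) else 0) = 1 := by
    simp only [decide_eq_true_eq]
    exact if_pos hpd
  rw [hif, hcol0]
  omega

lemma pvAlt_eq_total (nums : List Int) :
    numberOfSubarrays2_alt nums = (pvTotalUpto nums nums.length : Int) := by
  induction nums with
  | nil => rfl
  | cons x xs ih =>
    have hG0 : pvG (x :: xs) 0 = x := rfl
    have hinner := pvInner_spec x x (x :: xs)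
    have hcond : ∀ r ∈ List.range (x :: xs).length,
        ((fun r => decide (pvInnerCond x x (x :: xs) r)) r = true
          ↔ (fun r => decide (pvCond (x :: xs) 0 r)) r = true) := by
      intro r _
      simp only [decide_eq_true_eq]
      constructor
      · rintro ⟨ha, _, hc⟩
        intro k hk _
        refine ⟨by simpa [hG0] using ha k hk, ?_⟩
        rcases Nat.lt_or_ge k r with hlt | hge
        · exact hc k hlt
        · have : k = r := by omega
          subst this; exact le_refl _
      · intro h
        exact ⟨fun k hk => by simpa [hG0] using (h k hk (by omega)).1,
          by simpa [hG0] using (h r (by omega) (by omega)).1,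
          fun k hk => (h k (by omega) (by omega)).2⟩
    have : numberOfSubarrays2_alt (x :: xs) = pvInner x x (x :: xs) + numberOfSubarrays2_alt xs := rfl
    rw [this, hinner, List.countP_congr hcond, ih, List.length_cons, pvTotalUpto_cons]
    push_cast
    ring

-- ---- A side ----
lemma pvPopRB_eq (nums : List Int) (v : Int) (real : List Int)
    (h : real.Pairwise (fun a b => pvGetI nums a < pvGetI nums b)) :
    pvPopRB nums v (real ++ [-1]) = real.filter (fun j => decide (v < pvGetI nums j)) ++ [-1] := by
  induction real with
  | nil => rfl
  | cons j rest ih =>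
    rcases List.pairwise_cons.mp h with ⟨hj, hrest⟩
    rcases hrest' : rest ++ [(-1 : Int)] with _ | ⟨u, rest2⟩
    · exact absurd hrest' (by simp)
    by_cases hv : pvGetI nums j ≤ v
    · have hnot : ¬ (v < pvGetI nums j) := not_lt.mpr hv
      have := ih hrest
      rw [hrest'] at this
      simp [pvPopRB, hrest', hv, hnot, this]
    · have hlt : v < pvGetI nums j := not_le.mp hv
      have : rest.filter (fun j => decide (v < pvGetI nums j)) = rest :=
        List.filter_eq_self.mpr (fun b hb => by simpa using lt_trans hlt (hj b hb))
      simp [pvPopRB, hrest', hv, hlt, this]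

lemma pvPopLC_eq (nums : List Int) (v : Int) (real : List Int)
    (h : real.Pairwise (fun a b => pvGetI nums b ≤ pvGetI nums a)) :
    pvPopLC nums v real = real.filter (fun j => decide (pvGetI nums j ≤ v)) := by
  induction real with
  | nil => rfl
  | cons j rest ih =>
    rcases List.pairwise_cons.mp h with ⟨hj, hrest⟩
    by_cases hv : v < pvGetI nums j
    · have : ¬ (pvGetI nums j ≤ v) := not_le.mpr hv
      simp [pvPopLC, hv, this, ih hrest]
    · have hle : pvGetI nums j ≤ v := not_lt.mp hv
      have : rest.filter (fun j => decide (pvGetI nums j ≤ v)) = rest :=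
        List.filter_eq_self.mpr (fun b hb => by simpa using le_trans (hj b hb) hle)
      simp [pvPopLC, hv, hle, this]

-- the rightBigger stack without its -1 sentinel / the leftCand stack, generically
def pvStack (i : Nat) (P : Nat → Prop) [DecidablePred P] : List Int :=
  (((List.range i).filter (fun j => decide (P j))).reverse).map (fun (j : Nat) => (j : Int))

lemma pv_mem_stack (i : Nat) (P : Nat → Prop) [DecidablePred P] (x : Int) :
    x ∈ pvStack i P ↔ ∃ j : Nat, x = (j : Int) ∧ j < i ∧ P j := by
  simp only [pvStack, List.mem_map, List.mem_reverse, List.mem_filter, List.mem_range,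
    decide_eq_true_eq]
  constructor
  · rintro ⟨j, ⟨hj, hP⟩, rfl⟩; exact ⟨j, rfl, hj, hP⟩
  · rintro ⟨j, rfl, hj, hP⟩; exact ⟨j, ⟨hj, hP⟩, rfl⟩

lemma pv_pairwise_stack (i : Nat) (P : Nat → Prop) [DecidablePred P] (R : Int → Int → Prop)
    (h : ∀ a b : Nat, a < b → b < i → P a → P b → R ((b : Nat) : Int) ((a : Nat) : Int)) :
    (pvStack i P).Pairwise R := by
  rw [pvStack, List.pairwise_map, List.pairwise_reverse]
  have h0 : ((List.range i).filter (fun j => decide (P j))).Pairwise (· < ·) :=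
    List.Pairwise.filter _ List.pairwise_lt_range
  refine List.Pairwise.imp_of_mem ?_ h0
  intro a b ha hb hab
  rcases List.mem_filter.mp ha with ⟨ha', hPa⟩
  rcases List.mem_filter.mp hb with ⟨hb', hPb⟩
  exact h a b hab (List.mem_range.mp hb') (of_decide_eq_true hPa) (of_decide_eq_true hPb)

lemma pv_stack_filter (i : Nat) (P : Nat → Prop) [DecidablePred P]
    (Q : Nat → Prop) [DecidablePred Q] (pI : Int → Bool)
    (hp : ∀ j : Nat, j < i → pI ((j : Nat) : Int) = decide (Q j)) :
    (pvStack i P).filter pI = pvStack i (fun j => P j ∧ Q j) := by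
  rw [pvStack, pvStack, List.filter_map, List.filter_reverse, List.filter_filter]
  congr 2
  apply List.filter_congr
  intro j hj
  have hji : j < i := List.mem_range.mp hj
  simp only [Function.comp, hp j hji]
  by_cases hP : P j <;> by_cases hQ : Q j <;> simp [hP, hQ]

-- a maximal witness below a bound
lemma pv_max_witness (P : Nat → Prop) [DecidablePred P] :
    ∀ (i k : Nat), k < i → P k →
      ∃ m, k ≤ m ∧ m < i ∧ P m ∧ ∀ m', m < m' → m' < i → ¬ P m' := by
  intro i
  induction i with
  | zero => intro k hk; omega
  | succ n ih =>
    intro k hk hP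
    by_cases hn : P n
    · exact ⟨n, by omega, by omega, hn, fun m' h1 h2 => by omega⟩
    · rcases Nat.lt_or_ge k n with hkn | hkn
      · rcases ih k hkn hP with ⟨m, h1, h2, h3, h4⟩
        refine ⟨m, h1, by omega, h3, ?_⟩
        intro m' hm1 hm2
        rcases Nat.lt_or_ge m' n with h | h
        · exact h4 m' hm1 h
        · have : m' = n := by omega
          subst this; exact hn
      · have : k = n := by omega
        subst this; exact absurd hP hn

-- the new top of rightBigger characterises 'everything from j to i-1 is ≤ v'
lemma pv_top_iff (nums : List Int) (i : Nat) (v : Int)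
    (top : Int)
    (htop : top = ((pvStack i (fun j => pvRbP nums i j ∧ v < pvG nums j)) ++ [-1]).headD (-1))
    (j : Nat) (hj : j < i) :
    top < (j : Int) ↔ ∀ k, j ≤ k → k < i → pvG nums k ≤ v := by
  have hmem : ∀ k : Nat, k < i → v < pvG nums k →
      ∃ m : Nat, k ≤ m ∧ ((m : Nat) : Int) ∈ pvStack i (fun j => pvRbP nums i j ∧ v < pvG nums j) := by
    intro k hk hv
    rcases pv_max_witness (fun m => v < pvG nums m) i k hk hv with ⟨m, h1, h2, h3, h4⟩
    refine ⟨m, h1, (pv_mem_stack _ _ _).mpr ⟨m, rfl, h2, ?_, h3⟩⟩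
    intro k' hk' hmk'
    have : ¬ v < pvG nums k' := h4 k' hmk' hk'
    omega
  rcases hL : pvStack i (fun j => pvRbP nums i j ∧ v < pvG nums j) with _ | ⟨t, L'⟩
  · have htop' : top = -1 := by rw [htop, hL]; rfl
    constructor
    · intro _ k hjk hki
      by_contra hgt
      rcases hmem k hki (by omega) with ⟨m, _, hm⟩
      rw [hL] at hm
      exact absurd hm (List.not_mem_nil)
    · intro _
      rw [htop']
      omega
  · have htop' : top = t := by rw [htop, hL]; rfl
    have htmem : t ∈ pvStack i (fun j => pvRbP nums i j ∧ v < pvG nums j) := by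
      rw [hL]; exact List.mem_cons_self
    rcases (pv_mem_stack _ _ _).mp htmem with ⟨jt, rfl, hjt, _, hvjt⟩
    have hbig : ∀ x ∈ pvStack i (fun j => pvRbP nums i j ∧ v < pvG nums j), x ≤ ((jt : Nat) : Int) := by
      have hpw : (pvStack i (fun j => pvRbP nums i j ∧ v < pvG nums j)).Pairwise (fun a b => b < a) :=
        pv_pairwise_stack _ _ _ (fun a b hab _ _ _ => by exact_mod_cast hab)
      rw [hL] at hpw
      intro x hx
      rw [hL] at hx
      rcases List.mem_cons.mp hx with rfl | hx'
      · exact le_refl _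
      · exact le_of_lt ((List.pairwise_cons.mp hpw).1 x hx')
    rw [htop']
    constructor
    · intro hlt k hjk hki
      by_contra hgt
      rcases hmem k hki (by omega) with ⟨m, hkm, hm⟩
      have := hbig _ hm
      have : m ≤ jt := by exact_mod_cast this
      have : (jt : Int) < (j : Int) := hlt
      have : jt < j := by exact_mod_cast this
      omega
    · intro hall
      have : ¬ j ≤ jt := by
        intro hle
        exact absurd (hall jt hle hjt) (by omega)
      exact_mod_cast (by omega : jt < j)

lemma pv_stack_succ (i : Nat) (P Q : Nat → Prop) [DecidablePred P] [DecidablePred Q]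
    (hQi : P i) (heq : ∀ j, j < i → (P j ↔ Q j)) :
    pvStack (i + 1) P = (i : Int) :: pvStack i Q := by
  unfold pvStack
  rw [List.range_succ, List.filter_append]
  have h1 : [i].filter (fun j => decide (P j)) = [i] := by simp [hQi]
  have h2 : (List.range i).filter (fun j => decide (P j))
      = (List.range i).filter (fun j => decide (Q j)) := by
    apply List.filter_congr
    intro j hj
    simp [heq j (List.mem_range.mp hj)]
  rw [h1, h2]
  simp

lemma pv_stack_countP (i : Nat) (P : Nat → Prop) [DecidablePred P]
    (Q : Nat → Prop) [DecidablePred Q] (pI : Int → Bool)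
    (hp : ∀ j : Nat, j < i → pI ((j : Nat) : Int) = decide (Q j)) :
    (pvStack i P).countP pI = (List.range i).countP (fun j => decide (P j ∧ Q j)) := by
  rw [List.countP_eq_length_filter, pv_stack_filter i P Q pI hp, pvStack, List.length_map,
    List.length_reverse, ← List.countP_eq_length_filter]

lemma pv_totalUpto_succ (nums : List Int) (i : Nat) :
    pvTotalUpto nums (i + 1) = pvTotalUpto nums i + pvColCount nums i := by
  unfold pvTotalUpto
  rw [List.range_succ, List.map_append]
  simp

lemma pv_colCount_split (nums : List Int) (i : Nat) :
    pvColCount nums i = (List.range i).countP (fun l => decide (pvCond nums l i)) + 1 := by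
  unfold pvColCount
  rw [List.range_succ, List.countP_append]
  have h1 : List.countP (fun l => decide (pvCond nums l i)) [i] = 1 := by
    simp only [List.countP_cons, List.countP_nil, decide_eq_true_eq]
    rw [if_pos (pvCond_self nums i)]
  rw [h1]

lemma pvStep_eq (nums : List Int) (i : Nat) (_h : i < nums.length) :
    pvAStep nums ((pvTotalUpto nums i : Int), pvRBs nums i, pvLCs nums i) ((i : Int), pvG nums i) =
      ((pvTotalUpto nums (i + 1) : Int), pvRBs nums (i + 1), pvLCs nums (i + 1)) := by
  set v := pvG nums i with hv
  -- the two stacks as pvStack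
  have hRB : pvRBs nums i = pvStack i (fun j => pvRbP nums i j) ++ [-1] := rfl
  have hLC : pvLCs nums i = pvStack i (fun j => pvLcP nums i j) := rfl
  -- popping rightBigger
  have hpwRB : (pvStack i (fun j => pvRbP nums i j)).Pairwise
      (fun a b => pvGetI nums a < pvGetI nums b) := by
    apply pv_pairwise_stack
    intro a b hab hbi hPa _
    rw [pvGetI_cast, pvGetI_cast]
    exact hPa b hbi hab
  have hpopRB : pvPopRB nums v (pvRBs nums i)
      = (pvStack i (fun j => pvRbP nums i j)).filter (fun x => decide (v < pvGetI nums x)) ++ [-1] := by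
    rw [hRB]; exact pvPopRB_eq nums v _ hpwRB
  have hfilRB : (pvStack i (fun j => pvRbP nums i j)).filter (fun x => decide (v < pvGetI nums x))
      = pvStack i (fun j => pvRbP nums i j ∧ v < pvG nums j) := by
    apply pv_stack_filter
    intro j _
    rw [pvGetI_cast]
  -- the updated rightBigger stack
  have hRbi : pvRbP nums (i + 1) i := by intro k hk hik; omega
  have hRbiff : ∀ j, j < i → (pvRbP nums (i + 1) j ↔ pvRbP nums i j ∧ v < pvG nums j) := by
    intro j hj
    constructor
    · intro h
      exact ⟨fun k hk hjk => h k (by omega) hjk, h i (by omega) hj⟩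
    · rintro ⟨h1, h2⟩ k hk hjk
      rcases Nat.lt_or_ge k i with hki | hki
      · exact h1 k hki hjk
      · have : k = i := by omega
        subst this; exact h2
  have hRBnew : (i : Int) :: (pvStack i (fun j => pvRbP nums i j ∧ v < pvG nums j) ++ [-1])
      = pvRBs nums (i + 1) := by
    rw [show pvRBs nums (i + 1) = pvStack (i + 1) (fun j => pvRbP nums (i + 1) j) ++ [-1] from rfl]
    rw [pv_stack_succ (i := i) (P := fun j => pvRbP nums (i + 1) j)
      (Q := fun j => pvRbP nums i j ∧ v < pvG nums j) hRbi hRbiff]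
    simp
  -- popping leftCand
  have hpwLC : (pvStack i (fun j => pvLcP nums i j)).Pairwise
      (fun a b => pvGetI nums b ≤ pvGetI nums a) := by
    apply pv_pairwise_stack
    intro a b hab hbi hPa _
    rw [pvGetI_cast, pvGetI_cast]
    exact hPa b hbi hab
  have hpopLC : pvPopLC nums v (pvLCs nums i)
      = pvStack i (fun j => pvLcP nums i j ∧ pvG nums j ≤ v) := by
    rw [hLC, pvPopLC_eq nums v _ hpwLC]
    apply pv_stack_filter
    intro j _
    rw [pvGetI_cast]
  have hLci : pvLcP nums (i + 1) i := by intro k hk hik; omega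
  have hLciff : ∀ j, j < i → (pvLcP nums (i + 1) j ↔ pvLcP nums i j ∧ pvG nums j ≤ v) := by
    intro j hj
    constructor
    · intro h
      exact ⟨fun k hk hjk => h k (by omega) hjk, h i (by omega) hj⟩
    · rintro ⟨h1, h2⟩ k hk hjk
      rcases Nat.lt_or_ge k i with hki | hki
      · exact h1 k hki hjk
      · have : k = i := by omega
        subst this; exact h2
  have hLCnew : (i : Int) :: pvStack i (fun j => pvLcP nums i j ∧ pvG nums j ≤ v)
      = pvLCs nums (i + 1) := by
    rw [show pvLCs nums (i + 1) = pvStack (i + 1) (fun j => pvLcP nums (i + 1) j) from rfl]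
    rw [pv_stack_succ (i := i) (P := fun j => pvLcP nums (i + 1) j)
      (Q := fun j => pvLcP nums i j ∧ pvG nums j ≤ v) hLci hLciff]
  -- the count added for right endpoint i
  have hres : (pvTotalUpto nums i : Int)
      + (((pvLCs nums i).length : Int)
          - pvBisectRight (pvLCs nums i)
              (((pvStack i (fun j => pvRbP nums i j ∧ v < pvG nums j)) ++ [-1]).headD (-1)) + 1)
      = (pvTotalUpto nums (i + 1) : Int) := by
    set top := ((pvStack i (fun j => pvRbP nums i j ∧ v < pvG nums j)) ++ [-1]).headD (-1) with htop
    have hiff : ∀ j, j < i → ((pvLcP nums i j ∧ top < (j : Int)) ↔ pvCond nums j i) := by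
      intro j hj
      have htopiff := pv_top_iff nums i v top htop j hj
      constructor
      · rintro ⟨hlc, hlt⟩
        have hall := htopiff.mp hlt
        intro k hk hjk
        constructor
        · rcases Nat.lt_or_ge k i with hki | hki
          · rcases Nat.eq_or_lt_of_le hjk with rfl | hjk'
            · exact le_refl _
            · exact hlc k hki hjk'
          · have : k = i := by omega
            subst this
            exact hall j (le_refl _) hj
        · rcases Nat.lt_or_ge k i with hki | hki
          · exact hall k hjk hki
          · have : k = i := by omega
            subst this; exact le_refl _
      · intro hc
        refine ⟨fun k hk hjk => (hc k (by omega) (le_of_lt hjk)).1, htopiff.mpr ?_⟩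
        intro k hjk hki
        exact (hc k (by omega) hjk).2
    -- count of leftCand entries above top
    have hcnt : (pvLCs nums i).countP (fun x => !decide (x ≤ top))
        = (List.range i).countP (fun l => decide (pvCond nums l i)) := by
      rw [hLC]
      rw [pv_stack_countP i _ (fun j => top < (j : Int)) _
        (by
          intro j _
          by_cases h : top < (j : Int)
          · have h' : ¬ ((j : Int) ≤ top) := not_le.mpr h
            simp [h, h']
          · have h' : (j : Int) ≤ top := not_lt.mp h
            simp [h, h'])]
      apply List.countP_congr
      intro j hj
      simp only [decide_eq_true_eq]
      exact hiff j (List.mem_range.mp hj)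
    have hsplit : (pvLCs nums i).length
        = (pvLCs nums i).countP (fun x => decide (x ≤ top))
          + (pvLCs nums i).countP (fun x => !decide (x ≤ top)) := by
      rw [List.length_eq_countP_add_countP (fun x => decide (x ≤ top))]
      congr 1
      apply List.countP_congr
      intro x _
      simp
    rw [pv_totalUpto_succ, pv_colCount_split]
    unfold pvBisectRight
    rw [hsplit, hcnt]
    push_cast
    ring
  -- assemble
  show (_, _, _) = _
  simp only [pvAStep]
  rw [hpopRB, hfilRB]
  refine congrArg₂ _ ?_ (congrArg₂ _ ?_ ?_)
  · exact hres
  · exact hRBnew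
  · rw [hpopLC]; exact hLCnew

lemma pvA_loop (nums : List Int) : ∀ i, i ≤ nums.length →
    (PySem.List.enumerate (nums.take i) 0).foldl (pvAStep nums) (0, [-1], []) =
      ((pvTotalUpto nums i : Int), pvRBs nums i, pvLCs nums i) := by
  intro i
  induction i with
  | zero => intro _; simp [pvTotalUpto, pvRBs, pvLCs]
  | succ i ih =>
    intro hle
    have hi : i < nums.length := by omega
    have htake : nums.take (i + 1) = nums.take i ++ [nums[i]] := by
      rw [List.take_add_one, List.getElem?_eq_getElem hi]
      rfl
    have hlen : (nums.take i).length = i := by simp [List.length_take]; omega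
    rw [htake, PySem.List.enumerate_append, List.foldl_append, ih (by omega)]
    have h1 : PySem.List.enumerate [nums[i]] (0 + ((nums.take i).length : Int)) = [((i : Int), nums[i])] := by
      rw [PySem.List.enumerate_cons, PySem.List.enumerate_nil, hlen]
      norm_num
    rw [h1]
    have hgv : nums[i] = pvG nums i := by
      simp [pvG, List.getD_eq_getElem?_getD, List.getElem?_eq_getElem hi]
    simp only [List.foldl_cons, List.foldl_nil, hgv]
    exact pvStep_eq nums i hi

-- ===== VERDICT (by name: the statement is the Claim_ definition above) =====
theorem numberOfSubarrays2_spec : Claim_equal_numberOfSubarrays2 := by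
  intro nums _
  unfold Spec_numberOfSubarrays2
  have h := pvA_loop nums nums.length (le_refl _)
  rw [List.take_length] at h
  rw [numberOfSubarrays2, h, pvAlt_eq_total]
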